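-- pv_equiv track=rewrite | github.com/es335sh/elastic-tm | data_ingestor/data_ingestor.py | get_instrument_from_apid
-- ===== SOURCE A (Python) =====
-- def get_instrument_from_apid(apid):
--     apid_table = [
--         ('sc', range(168, 169)),
--         ('epd', range(800, 912)),  ('epd', range(1600, 1616)),
--         ('eui', range(912, 1008)),
--         ('mag', range(1008, 1072)),
--         ('met', range(1072, 1152)),
--         ('phi', range(1152, 1200)),
--         ('rpw', range(1200, 1312)),
--         ('shi', range(1312, 1360)),
--         ('spi', range(1360, 1440)), ('spi', range(1616, 1680)),
--         ('stx', range(1440, 1520)),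
--         ('swa', range(1520, 1600))]
--
--     for tuple in apid_table:
--         if int(apid) in tuple[1]:
--             return tuple[0]
--
--     raise Exception('Unknown APID')
-- ===== SOURCE B (Python) =====
-- def get_instrument_from_apid(apid):
--     key = int(apid)
--     # (start, end, name), sorted by start, ranges non-overlapping
--     table = [
--         (168, 169, 'sc'), (800, 912, 'epd'), (912, 1008, 'eui'),
--         (1008, 1072, 'mag'), (1072, 1152, 'met'), (1152, 1200, 'phi'),
--         (1200, 1312, 'rpw'), (1312, 1360, 'shi'), (1360, 1440, 'spi'),
--         (1440, 1520, 'stx'), (1520, 1600, 'swa'), (1600, 1616, 'epd'),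
--         (1616, 1680, 'spi')]
--     lo, hi = 0, len(table)
--     while lo < hi:
--         mid = (lo + hi) // 2
--         start, end, name = table[mid]
--         if key < start:
--             hi = mid
--         elif key >= end:
--             lo = mid + 1
--         else:
--             return name
--     raise Exception('Unknown APID')
-- ===== Notes on version B (the rewrite author's own statement) =====
-- stated objective: alternative
-- what changed: Replaces the linear first-match scan over the (name, range) table with a binary search over the same intervals re-sorted by start (and both raise the same Exception on a miss).
import Mathlib
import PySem

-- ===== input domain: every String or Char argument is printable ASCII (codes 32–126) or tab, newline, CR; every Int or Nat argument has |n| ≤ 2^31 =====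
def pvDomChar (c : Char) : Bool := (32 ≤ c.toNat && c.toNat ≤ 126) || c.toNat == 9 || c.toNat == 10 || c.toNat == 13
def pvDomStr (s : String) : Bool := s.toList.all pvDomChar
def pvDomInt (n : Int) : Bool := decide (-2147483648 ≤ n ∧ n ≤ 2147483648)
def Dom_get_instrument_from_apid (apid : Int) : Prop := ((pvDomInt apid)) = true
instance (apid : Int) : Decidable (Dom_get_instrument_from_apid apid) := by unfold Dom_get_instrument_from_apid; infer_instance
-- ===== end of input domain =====

-- B replaces A's linear first-match scan of the range table by a binary search over the
-- same intervals re-sorted by start; equivalence is about the return value, both raise on a miss.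

-- ===== PORT A =====
-- A's table, in A's order: (name, range start, range stop)
def apidTableA : List (String × Int × Int) :=
  [("sc", 168, 169),
   ("epd", 800, 912), ("epd", 1600, 1616),
   ("eui", 912, 1008),
   ("mag", 1008, 1072),
   ("met", 1072, 1152),
   ("phi", 1152, 1200),
   ("rpw", 1200, 1312),
   ("shi", 1312, 1360),
   ("spi", 1360, 1440), ("spi", 1616, 1680),
   ("stx", 1440, 1520),
   ("swa", 1520, 1600)]

-- the for-loop: first entry whose range contains apid ('int(apid) in range(a,b)' = a ≤ apid < b)
def scanTableA (table : List (String × Int × Int)) (apid : Int) : Option String :=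
  match table with
  | [] => none
  | (name, lo, hi) :: rest =>
      if lo ≤ apid ∧ apid < hi then some name else scanTableA rest apid

-- none = the final 'raise Exception'; excluded by Pre_
def get_instrument_from_apid (apid : Int) : String :=
  (scanTableA apidTableA apid).getD ""

-- ===== PORT B =====
-- B's table: (start, end, name), sorted by start
def apidTableB : List (Int × Int × String) :=
  [(168, 169, "sc"), (800, 912, "epd"), (912, 1008, "eui"),
   (1008, 1072, "mag"), (1072, 1152, "met"), (1152, 1200, "phi"),
   (1200, 1312, "rpw"), (1312, 1360, "shi"), (1360, 1440, "spi"),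
   (1440, 1520, "stx"), (1520, 1600, "swa"), (1600, 1616, "epd"),
   (1616, 1680, "spi")]

-- the while loop of B: binary search on [lo, hi); fuel-based structural recursion
-- (fuel starts at the table length ≥ hi - lo, and hi - lo shrinks every iteration,
-- so the fuel never runs out: the 'none' at fuel 0 is unreachable)
def bsearchB (key : Int) : Nat → Nat → Nat → Option String
  | 0, _, _ => none
  | fuel + 1, lo, hi =>
    if lo < hi then
      let mid := (lo + hi) / 2
      match apidTableB.getD mid (0, 0, "") with
      | (start, stop, name) =>
        if key < start then bsearchB key fuel lo mid
        else if stop ≤ key then bsearchB key fuel (mid + 1) hi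
        else some name
    else none

-- none = 'raise Exception(\'Unknown APID\')'; excluded by Pre_
def get_instrument_from_apid_alt (apid : Int) : String :=
  (bsearchB apid apidTableB.length 0 apidTableB.length).getD ""

-- ===== PRECONDITION & SPEC =====
-- Pre_ excludes exactly the APIDs outside every table range, where Python A (and B) raise Exception('Unknown APID').
def Pre_get_instrument_from_apid (apid : Int) : Prop :=
  apid = 168 ∨ (800 ≤ apid ∧ apid < 1680)
instance (apid : Int) : Decidable (Pre_get_instrument_from_apid apid) := by
  unfold Pre_get_instrument_from_apid; infer_instance

def pvWitness_get_instrument_from_apid : Int := (1234)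

def Spec_get_instrument_from_apid (apid : Int) (out : String) : Prop := out = get_instrument_from_apid_alt apid
instance (apid : Int) (out : String) : Decidable (Spec_get_instrument_from_apid apid out) := by unfold Spec_get_instrument_from_apid; infer_instance

-- ===== CLAIM (what is proved, stated in full; the proofs are below) =====
def Claim_equal_get_instrument_from_apid : Prop := ∀ (apid : Int), Dom_get_instrument_from_apid apid → Pre_get_instrument_from_apid apid → Spec_get_instrument_from_apid apid (get_instrument_from_apid apid)

-- ===== LEMMAS AND PROOFS =====

set_option maxRecDepth 8000 in
-- the finite check: both ports agree on every APID of the contiguous block [800, 1680)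
theorem pv_check_block :
    ∀ k ∈ List.range 880,
      get_instrument_from_apid (800 + (k : Int)) = get_instrument_from_apid_alt (800 + (k : Int)) := by
  decide

theorem pv_check_168 : get_instrument_from_apid 168 = get_instrument_from_apid_alt 168 := by
  decide

-- ===== VERDICT (by name: the statement is the Claim_ definition above) =====
theorem get_instrument_from_apid_spec : Claim_equal_get_instrument_from_apid := by
  intro apid _ hPre
  unfold Spec_get_instrument_from_apid
  rcases hPre with h168 | ⟨hlo, hhi⟩
  · subst h168; exact pv_check_168
  · have hk : apid = 800 + ((apid - 800).toNat : Int) := by omega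
    rw [hk]
    exact pv_check_block (apid - 800).toNat (by
      rw [List.mem_range]; omega)
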